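-- pv_equiv track=rewrite | github.com/MegoTech/Code-questions-marathon | Dictionary/SumCLI.py | comennds_num
-- ===== SOURCE A (Python) =====
-- def comennds_num(comends):
--     commands = {"cp": [], "ls": [], "mv": []}
--     for i in range(len(comends)):
--         place = 0
--         if comends[i][0] == "!":
--             place = int(comends[i][1:])
--         if comends[i] == "cp" or place in commands["cp"]:
--             commands["cp"].append(i + 1)
--         elif comends[i] == "ls" or place in commands["ls"]:
--             commands["ls"].append(i + 1)
--         elif comends[i] == "mv" or place in commands["mv"]:
--             commands["mv"].append(i + 1)
--
--     return [len(commands[keyM]) for keyM in commands.keys()]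
-- ===== SOURCE B (Python) =====
-- def comennds_num(comends):
--     # Stateless resolution: the category of position j is found by chasing the
--     # back-reference chain from j until a literal command (or a dead end).
--     def resolve(j):
--         while True:
--             cmd = comends[j - 1]
--             if cmd in ("cp", "ls", "mv"):
--                 return cmd
--             place = 0
--             if cmd[0] == "!":
--                 place = int(cmd[1:])
--             if 1 <= place < j:
--                 j = place
--             else:
--                 return None
--
--     res = [resolve(j) for j in range(1, len(comends) + 1)]
--     return [res.count(c) for c in ("cp", "ls", "mv")]
-- ===== Notes on version B (the rewrite author's own statement) =====
-- stated objective: alternative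
-- what changed: Replaces A's stateful single pass accumulating three per-category position lists (each command classified by scanning those lists) with stateless per-position pointer chasing: each position's category is computed independently by following its back-reference chain down to a literal command, and the three counts are taken once at the end.
-- outside the precondition, e.g. on comennds_num(['']): A raises IndexError, B raises IndexError; on comennds_num(['!x']): A raises ValueError, B raises ValueError
import Mathlib
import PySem

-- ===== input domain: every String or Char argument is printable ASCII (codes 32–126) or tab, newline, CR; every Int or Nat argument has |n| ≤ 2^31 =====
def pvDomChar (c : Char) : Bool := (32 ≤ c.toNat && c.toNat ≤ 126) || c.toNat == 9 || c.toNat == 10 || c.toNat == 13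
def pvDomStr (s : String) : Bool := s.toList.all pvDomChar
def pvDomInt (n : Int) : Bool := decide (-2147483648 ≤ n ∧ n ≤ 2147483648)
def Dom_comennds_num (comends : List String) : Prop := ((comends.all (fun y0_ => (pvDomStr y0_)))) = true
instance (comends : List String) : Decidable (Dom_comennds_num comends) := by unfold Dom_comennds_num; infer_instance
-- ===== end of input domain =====

-- B drops A's stateful pass (three accumulated position lists scanned per command) and instead
-- resolves each position independently by chasing its back-reference chain to a literal command,
-- counting categories once at the end (objective: alternative).

-- ===== PORT A =====
-- place = 0; if cmd[0] == "!": place = int(cmd[1:])   (shared line of both Pythons)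
def placeOf (s : String) : Int :=
  if PySem.Str.pyGet? s 0 = some '!'
  then (PySem.Int.ofStr? (PySem.Str.slice s (some 1) none)).getD 0
  else 0

-- one iteration of A's for-loop over the dict {"cp": [], "ls": [], "mv": []} (a triple of lists)
def stepA (st : List Int × List Int × List Int) (i : Int) (s : String) :
    List Int × List Int × List Int :=
  let place := placeOf s
  if s = "cp" ∨ place ∈ st.1 then (st.1 ++ [i + 1], st.2.1, st.2.2)
  else if s = "ls" ∨ place ∈ st.2.1 then (st.1, st.2.1 ++ [i + 1], st.2.2)
  else if s = "mv" ∨ place ∈ st.2.2 then (st.1, st.2.1, st.2.2 ++ [i + 1])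
  else st

def comennds_num (comends : List String) : List Int :=
  let commands :=
    (PySem.List.pyRange 0 (PySem.List.len comends) 1).foldl
      (fun st i => stepA st i (PySem.List.pyGetD comends i "")) ([], [], [])
  [(commands.1.length : Int), (commands.2.1.length : Int), (commands.2.2.length : Int)]

-- ===== PORT B =====
-- Source B's while-loop 'resolve(j)': chase the back-reference chain from 1-indexed position j;
-- the loop variable strictly decreases, so it is the obvious well-founded recursion on j
def resolveB (comends : List String) (j : Nat) : Option String :=
  if PySem.List.pyGetD comends ((j : Int) - 1) "" ∈ (["cp", "ls", "mv"] : List String) then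
    some (PySem.List.pyGetD comends ((j : Int) - 1) "")
  else if h : 1 ≤ placeOf (PySem.List.pyGetD comends ((j : Int) - 1) "") ∧
      placeOf (PySem.List.pyGetD comends ((j : Int) - 1) "") < (j : Int) then
    resolveB comends (placeOf (PySem.List.pyGetD comends ((j : Int) - 1) "")).toNat
  else none
termination_by j
decreasing_by omega

def comennds_num_alt (comends : List String) : List Int :=
  let res := (PySem.List.pyRange 1 (PySem.List.len comends + 1) 1).map
      (fun j => resolveB comends j.toNat)
  (["cp", "ls", "mv"] : List String).map (fun c => (res.count (some c) : Int))

-- ===== PRECONDITION & SPEC =====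
-- Pre_ excludes exactly the inputs on which the Python raises: an empty command (IndexError on
-- cmd[0]) or a '!'-command whose tail is not an int literal (ValueError in int(cmd[1:])).
def Pre_comennds_num (comends : List String) : Prop :=
  ∀ s ∈ comends, s ≠ "" ∧
    (PySem.Str.pyGet? s 0 = some '!' →
      (PySem.Int.ofStr? (PySem.Str.slice s (some 1) none)).isSome = true)
instance (comends : List String) : Decidable (Pre_comennds_num comends) := by
  unfold Pre_comennds_num; infer_instance

def pvWitness_comennds_num : List String := ["cp", "!1", "ls", "xx", "!2", "mv", "!6"]

def Spec_comennds_num (comends : List String) (out : List Int) : Prop := out = comennds_num_alt comends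
instance (comends : List String) (out : List Int) : Decidable (Spec_comennds_num comends out) := by unfold Spec_comennds_num; infer_instance

-- ===== CLAIM (what is proved, stated in full; the proofs are below) =====
def Claim_equal_comennds_num : Prop := ∀ (comends : List String), Dom_comennds_num comends → Pre_comennds_num comends → Spec_comennds_num comends (comennds_num comends)

-- ===== LEMMAS AND PROOFS =====

-- the positions 1..n that A has filed under category c, characterised through B's resolver
def posL (comends : List String) (c : String) (n : Nat) : List Int :=
  (List.range n).filterMap
    (fun k => if resolveB comends (k + 1) = some c then some ((k : Int) + 1) else none)

lemma mem_posL {comends : List String} {c : String} {n : Nat} {p : Int} :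
    p ∈ posL comends c n ↔ 1 ≤ p ∧ p ≤ (n : Int) ∧ resolveB comends p.toNat = some c := by
  simp only [posL, List.mem_filterMap, List.mem_range]
  constructor
  · rintro ⟨k, hk, hif⟩
    split_ifs at hif with hr
    cases hif
    refine ⟨by omega, by omega, ?_⟩
    have hcast' : ((k : Int) + 1).toNat = k + 1 := by omega
    rw [hcast']; exact hr
  · rintro ⟨h1, h2, hr⟩
    refine ⟨p.toNat - 1, by omega, ?_⟩
    have hp : p.toNat - 1 + 1 = p.toNat := by omega
    rw [hp, if_pos hr]
    have hcast : ((p.toNat - 1 : Nat) : Int) + 1 = p := by omega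
    rw [hcast]

lemma resolveB_cases (comends : List String) (j : Nat) :
    resolveB comends j = none ∨ resolveB comends j = some "cp" ∨
    resolveB comends j = some "ls" ∨ resolveB comends j = some "mv" := by
  induction j using Nat.strong_induction_on with
  | _ j ih =>
    rw [resolveB.eq_def]
    set cmd := PySem.List.pyGetD comends ((j : Int) - 1) "" with hcmd
    by_cases hc : cmd ∈ (["cp", "ls", "mv"] : List String)
    · simp only [if_pos hc]
      simp only [List.mem_cons, List.not_mem_nil, or_false] at hc
      rcases hc with h | h | h <;> simp [h]
    · simp only [if_neg hc]
      by_cases h : 1 ≤ placeOf cmd ∧ placeOf cmd < (j : Int)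
      · simp only [dif_pos h]
        exact ih (placeOf cmd).toNat (by omega)
      · simp [dif_neg h]

-- unfolding of resolveB at position n+1 when n < comends.length
lemma resolveB_succ (comends : List String) (n : Nat) (_hn : n < comends.length) :
    resolveB comends (n + 1) =
      (if PySem.List.pyGetD comends (n : Int) "" ∈ (["cp", "ls", "mv"] : List String) then
         some (PySem.List.pyGetD comends (n : Int) "")
       else if 1 ≤ placeOf (PySem.List.pyGetD comends (n : Int) "") ∧
           placeOf (PySem.List.pyGetD comends (n : Int) "") < ((n : Int) + 1) then
         resolveB comends (placeOf (PySem.List.pyGetD comends (n : Int) "")).toNat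
       else none) := by
  rw [resolveB.eq_def]
  have h1 : ((n + 1 : Nat) : Int) - 1 = (n : Int) := by omega
  have h2 : ((n + 1 : Nat) : Int) = (n : Int) + 1 := by omega
  rw [h1, h2]
  split_ifs <;> rfl

lemma posL_succ (comends : List String) (c : String) (n : Nat) :
    posL comends c (n + 1) =
      posL comends c n ++
        (if resolveB comends (n + 1) = some c then [(n : Int) + 1] else []) := by
  simp only [posL, List.range_succ, List.filterMap_append, List.filterMap_cons,
    List.filterMap_nil]
  split_ifs <;> rfl

-- a literal category command has place 0 (its first char is not '!')
lemma placeOf_cat {s : String} (h : s ∈ (["cp", "ls", "mv"] : List String)) : placeOf s = 0 := by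
  simp only [List.mem_cons, List.not_mem_nil, or_false] at h
  rcases h with rfl | rfl | rfl <;> decide

lemma zero_not_mem_posL (comends : List String) (c : String) (n : Nat) :
    (0 : Int) ∉ posL comends c n := by
  rw [mem_posL]; omega

-- the heart: one A-step on the posL triple records exactly resolveB's verdict at position n+1
lemma stepA_posL (comends : List String) (n : Nat) (hn : n < comends.length) :
    stepA (posL comends "cp" n, posL comends "ls" n, posL comends "mv" n) (n : Int)
        (PySem.List.pyGetD comends (n : Int) "") =
      (posL comends "cp" (n + 1), posL comends "ls" (n + 1), posL comends "mv" (n + 1)) := by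
  rw [posL_succ, posL_succ, posL_succ, resolveB_succ comends n hn]
  generalize PySem.List.pyGetD comends (n : Int) "" = s
  by_cases hc : s ∈ (["cp", "ls", "mv"] : List String)
  · have hp0 : placeOf s = 0 := placeOf_cat hc
    simp only [if_pos hc]
    simp only [List.mem_cons, List.not_mem_nil, or_false] at hc
    have z1 := zero_not_mem_posL comends "cp" n
    have z2 := zero_not_mem_posL comends "ls" n
    have z3 := zero_not_mem_posL comends "mv" n
    rcases hc with rfl | rfl | rfl <;>
      simp_all [stepA]
  · simp only [if_neg hc]
    have hscp : s ≠ "cp" := fun h => hc (by simp [h])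
    have hsls : s ≠ "ls" := fun h => hc (by simp [h])
    have hsmv : s ≠ "mv" := fun h => hc (by simp [h])
    by_cases h : 1 ≤ placeOf s ∧ placeOf s < ((n : Int) + 1)
    · simp only [if_pos h]
      have hmem : ∀ c, placeOf s ∈ posL comends c n ↔ resolveB comends (placeOf s).toNat = some c := by
        intro c
        rw [mem_posL]
        constructor
        · rintro ⟨-, -, hr⟩; exact hr
        · intro hr; exact ⟨h.1, by omega, hr⟩
      rcases resolveB_cases comends (placeOf s).toNat with hr | hr | hr | hr <;>
        [skip;
         (have m1 : placeOf s ∈ posL comends "cp" n := (hmem "cp").mpr hr);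
         (have m2 : placeOf s ∈ posL comends "ls" n := (hmem "ls").mpr hr);
         (have m3 : placeOf s ∈ posL comends "mv" n := (hmem "mv").mpr hr)] <;>
      · have n1 := (hmem "cp").not
        have n2 := (hmem "ls").not
        have n3 := (hmem "mv").not
        simp_all [stepA]
    · simp only [if_neg h]
      have hnm : ∀ c, placeOf s ∉ posL comends c n := by
        intro c hm
        rw [mem_posL] at hm
        exact h ⟨hm.1, by omega⟩
      have n1 := hnm "cp"
      have n2 := hnm "ls"
      have n3 := hnm "mv"
      simp_all [stepA]

lemma foldA_eq (comends : List String) :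
    ∀ n : Nat, n ≤ comends.length →
      (PySem.List.pyRange 0 (n : Int) 1).foldl
          (fun st i => stepA st i (PySem.List.pyGetD comends i "")) ([], [], []) =
        (posL comends "cp" n, posL comends "ls" n, posL comends "mv" n) := by
  intro n
  induction n with
  | zero => intro _; simp [PySem.List.pyRange_one_eq_nil, posL]
  | succ m ih =>
    intro hm
    have hcast : ((m + 1 : Nat) : Int) = (m : Int) + 1 := by push_cast; ring
    rw [hcast, PySem.List.pyRange_one_succ_right (by omega), List.foldl_append,
      ih (by omega)]
    simpa using stepA_posL comends m (by omega)

lemma map_res (comends : List String) :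
    ∀ n : Nat, (PySem.List.pyRange 1 ((n : Int) + 1) 1).map (fun j => resolveB comends j.toNat) =
      (List.range n).map (fun k => resolveB comends (k + 1)) := by
  intro n
  induction n with
  | zero => simp [PySem.List.pyRange_one_eq_nil]
  | succ m ih =>
    have hc : ((m + 1 : Nat) : Int) + 1 = ((m : Int) + 1) + 1 := by push_cast; ring
    rw [hc, PySem.List.pyRange_one_succ_right (by omega), List.map_append, ih, List.range_succ,
      List.map_append]
    have ht : ((m : Int) + 1).toNat = m + 1 := by omega
    simp [ht]

lemma count_res (comends : List String) (c : String) :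
    (((PySem.List.pyRange 1 ((comends.length : Int) + 1) 1).map
        (fun j => resolveB comends j.toNat)).count (some c) : Int) =
      ((posL comends c comends.length).length : Int) := by
  rw [map_res comends comends.length]
  congr 1
  rw [List.count_eq_countP, List.countP_map, posL, List.length_filterMap_eq_countP]
  apply List.countP_congr
  intro k _
  simp only [Function.comp, beq_iff_eq]
  split_ifs with h <;> simp [h]

-- ===== VERDICT (by name: the statement is the Claim_ definition above) =====
theorem comennds_num_spec : Claim_equal_comennds_num := by
  intro comends _ _
  unfold Spec_comennds_num comennds_num comennds_num_alt
  have hlen : PySem.List.len comends = (comends.length : Int) := PySem.List.len_eq comends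
  rw [hlen, foldA_eq comends comends.length le_rfl]
  simp only [List.map_cons, List.map_nil]
  rw [← count_res comends "cp", ← count_res comends "ls", ← count_res comends "mv"]
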